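-- pv_equiv track=rewrite | github.com/Simula-COMPLEX/quito | ex3/quito.py | _input_group
-- ===== SOURCE A (Python) =====
-- def _input_group(valid_input):
--     index = [] #unique input index
--     index_flag = valid_input[0]
--     index.append(0)
--     for i in range(1,len(valid_input)):
--         if valid_input[i] != index_flag:
--             index.append(i)
--             index_flag = valid_input[i]
--     return index
-- ===== SOURCE B (Python) =====
-- def _input_group(valid_input):
--     # Stage 1: run-length encode the list into group lengths (no indices kept).
--     lengths = []
--     run = 0
--     prev = object()
--     for v in valid_input:
--         if run and v == prev:
--             run += 1
--         else:
--             if run: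
--                 lengths.append(run)
--             run = 1
--             prev = v
--     if run:
--         lengths.append(run)
--     # Stage 2: group starts are the prefix sums of the group lengths.
--     starts = []
--     pos = 0
--     for length in lengths:
--         starts.append(pos)
--         pos += length
--     return starts
-- ===== Notes on version B (the rewrite author's own statement) =====
-- stated objective: alternative
-- what changed: B run-length-encodes the list into group lengths and then derives each start index arithmetically as a prefix sum of those lengths, instead of A's single pass that records indices directly while comparing to a carried flag; Pre_ excludes the empty list, on which A raises IndexError.
import Mathlib
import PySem

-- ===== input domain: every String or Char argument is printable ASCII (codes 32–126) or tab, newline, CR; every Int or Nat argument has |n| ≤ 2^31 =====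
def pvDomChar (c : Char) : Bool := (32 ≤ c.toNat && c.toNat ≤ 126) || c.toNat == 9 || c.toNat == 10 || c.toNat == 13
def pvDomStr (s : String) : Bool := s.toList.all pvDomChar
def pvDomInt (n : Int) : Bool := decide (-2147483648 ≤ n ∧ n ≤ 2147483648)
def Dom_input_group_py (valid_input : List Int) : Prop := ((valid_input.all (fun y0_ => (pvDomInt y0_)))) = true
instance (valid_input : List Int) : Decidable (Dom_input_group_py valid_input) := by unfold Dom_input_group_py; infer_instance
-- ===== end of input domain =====

-- B run-length-encodes the list into group lengths, then derives the start indices as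
-- prefix sums of those lengths, instead of A's single pass recording indices against a
-- carried flag; same O(n) cost (objective: alternative).
-- A raises IndexError on the empty list; Pre_ excludes it (B returns [] there).


-- ===== PORT A =====
-- Literal transliteration: index = [0], flag = valid_input[0], then
-- for i in range(1, len): if valid_input[i] != flag: append i; flag = valid_input[i].
-- pyGetD is exact here: Pre_ gives a nonempty list and range indices are in bounds.
def input_group_py (valid_input : List Int) : List Int :=
  let index_flag := PySem.List.pyGetD valid_input 0 0
  ((PySem.List.pyRange 1 (valid_input.length : Int) 1).foldl
    (fun (st : List Int × Int) i =>
      let v := PySem.List.pyGetD valid_input i 0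
      if v ≠ st.2 then (st.1 ++ [i], v) else st)
    ([0], index_flag)).1

-- ===== PORT B =====
-- Stage 1: run-length encode; state = (lengths, run, prev), prev starts as the
-- sentinel object() (modelled as none, which compares unequal to every element).
def bStep (st : List Int × Int × Option Int) (v : Int) : List Int × Int × Option Int :=
  if st.2.1 ≠ 0 ∧ some v = st.2.2 then (st.1, st.2.1 + 1, st.2.2)
  else ((if st.2.1 ≠ 0 then st.1 ++ [st.2.1] else st.1), 1, some v)

-- the trailing "if run: lengths.append(run)"
def bFin (st : List Int × Int × Option Int) : List Int :=
  if st.2.1 ≠ 0 then st.1 ++ [st.2.1] else st.1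

def bStage1 (valid_input : List Int) : List Int :=
  bFin (valid_input.foldl bStep ([], 0, none))

-- Stage 2: starts are the prefix sums of the group lengths.
def input_group_py_alt (valid_input : List Int) : List Int :=
  ((bStage1 valid_input).foldl
    (fun (st : List Int × Int) length => (st.1 ++ [st.2], st.2 + length))
    ([], 0)).1

-- ===== PRECONDITION & SPEC =====
-- Pre_ excludes exactly the empty list, on which A raises IndexError (valid_input[0]).
def Pre_input_group_py (valid_input : List Int) : Prop := valid_input ≠ []
instance (valid_input : List Int) : Decidable (Pre_input_group_py valid_input) := by unfold Pre_input_group_py; infer_instance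

def pvWitness_input_group_py : List Int := [1, 1, 2]

def Spec_input_group_py (valid_input : List Int) (out : List Int) : Prop := out = input_group_py_alt valid_input
instance (valid_input : List Int) (out : List Int) : Decidable (Spec_input_group_py valid_input out) := by unfold Spec_input_group_py; infer_instance

-- ===== CLAIM (what is proved, stated in full; the proofs are below) =====
def Claim_equal_input_group_py : Prop := ∀ (valid_input : List Int), Dom_input_group_py valid_input → Pre_input_group_py valid_input → Spec_input_group_py valid_input (input_group_py valid_input)

-- ===== LEMMAS AND PROOFS =====

-- common specification: run starts of a list, positions from p
def tstarts (v : Int) : List Int → Int → List Int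
  | [], _ => []
  | b :: t, p => if b ≠ v then p :: tstarts b t (p + 1) else tstarts v t (p + 1)

def rstarts : List Int → Int → List Int
  | [], _ => []
  | a :: t, p => p :: tstarts a t (p + 1)

theorem drop_cons_getD (xs : List Int) (j : Nat) (hj : j < xs.length) :
    xs.drop j = PySem.List.pyGetD xs (j : Int) 0 :: xs.drop (j + 1) := by
  rw [PySem.List.pyGetD_natCast, List.getD_eq_getElem?_getD, List.getElem?_eq_getElem hj]
  simpa using List.drop_eq_getElem_cons hj

theorem A_fold (xs : List Int) : ∀ (k j : Nat) (acc : List Int) (v : Int),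
    xs.length - j ≤ k →
    ((PySem.List.pyRange (j : Int) (xs.length : Int) 1).foldl
      (fun (st : List Int × Int) i =>
        let w := PySem.List.pyGetD xs i 0
        if w ≠ st.2 then (st.1 ++ [i], w) else st)
      (acc, v)).1
    = acc ++ tstarts v (xs.drop j) (j : Int) := by
  intro k
  induction k with
  | zero =>
    intro j acc v hk
    have hj : xs.length ≤ j := by omega
    rw [PySem.List.pyRange_one_eq_nil (by exact_mod_cast hj), List.drop_eq_nil_of_le hj]
    simp [tstarts]
  | succ k ih =>
    intro j acc v hk
    by_cases hj : j < xs.length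
    · rw [PySem.List.pyRange_one_cons (by exact_mod_cast hj)]
      rw [drop_cons_getD xs j hj]
      simp only [List.foldl_cons]
      have hcast : (j : Int) + 1 = ((j + 1 : Nat) : Int) := by push_cast; ring
      split_ifs with hne
      · rw [hcast, ih (j + 1) (acc ++ [(j : Int)]) _ (by omega)]
        rw [show tstarts v (PySem.List.pyGetD xs (j : Int) 0 :: xs.drop (j + 1)) (j : Int)
              = (j : Int) :: tstarts (PySem.List.pyGetD xs (j : Int) 0) (xs.drop (j + 1)) ((j : Int) + 1)
            from if_pos hne, hcast]
        simp
      · rw [hcast, ih (j + 1) acc v (by omega)]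
        rw [show tstarts v (PySem.List.pyGetD xs (j : Int) 0 :: xs.drop (j + 1)) (j : Int)
              = tstarts v (xs.drop (j + 1)) ((j : Int) + 1)
            from if_neg hne, hcast]
    · have hj' : xs.length ≤ j := by omega
      rw [PySem.List.pyRange_one_eq_nil (by exact_mod_cast hj'), List.drop_eq_nil_of_le hj']
      simp [tstarts]

theorem A_eq_rstarts (xs : List Int) (hx : xs ≠ []) :
    input_group_py xs = rstarts xs 0 := by
  obtain ⟨a, t, rfl⟩ := List.exists_cons_of_ne_nil hx
  have h := A_fold (a :: t) (a :: t).length 1 [0] a (by omega)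
  rw [Nat.cast_one] at h
  unfold input_group_py
  simp only [PySem.List.pyGetD_zero_cons]
  rw [h]
  simp [rstarts]

-- B side: the run-length list of a list, with a running current run (v, run)
def rl (v : Int) (run : Int) : List Int → List Int
  | [] => [run]
  | b :: t => if b = v then rl v (run + 1) t else run :: rl b 1 t

-- stage-1 fold over the remaining list t, with a live current run, yields rl
theorem bStage1_fold (t : List Int) : ∀ (lengths : List Int) (run v : Int), 0 < run →
    bFin (t.foldl bStep (lengths, run, some v)) = lengths ++ rl v run t := by
  induction t with
  | nil =>
    intro lengths run v hrun
    simp only [List.foldl_nil, rl, bFin]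
    rw [if_pos (by omega)]
  | cons b t ih =>
    intro lengths run v hrun
    simp only [List.foldl_cons, rl]
    by_cases hb : b = v
    · rw [show bStep (lengths, run, some v) b = (lengths, run + 1, some v) by
        simp [bStep]; omega]
      rw [if_pos hb]
      exact ih lengths (run + 1) v (by omega)
    · rw [show bStep (lengths, run, some v) b = (lengths ++ [run], 1, some b) by
        simp only [bStep]
        rw [if_neg (by simp [hb]), if_pos (by omega)]]
      rw [if_neg hb, ih (lengths ++ [run]) 1 b (by omega)]
      simp

theorem bStage1_eq_rl (a : Int) (t : List Int) : bStage1 (a :: t) = rl a 1 t := by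
  unfold bStage1
  simp only [List.foldl_cons]
  rw [show bStep ([], 0, none) a = ([], 1, some a) by simp [bStep]]
  simpa using bStage1_fold t [] 1 a (by omega)

-- stage-2 fold over rl produces the run starts (current run started at p - run)
theorem bStage2_fold (t : List Int) : ∀ (v run p : Int) (acc : List Int), 0 < run →
    ((rl v run t).foldl
      (fun (st : List Int × Int) length => (st.1 ++ [st.2], st.2 + length))
      (acc, p - run)).1
    = acc ++ (p - run) :: tstarts v t p := by
  induction t with
  | nil =>
    intro v run p acc hrun
    simp [rl, tstarts]
  | cons b t ih =>
    intro v run p acc hrun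
    by_cases hb : b = v
    · rw [show rl v run (b :: t) = rl v (run + 1) t from if_pos hb]
      have h := ih v (run + 1) (p + 1) acc (by omega)
      rw [show p + 1 - (run + 1) = p - run by ring] at h
      rw [h]
      rw [show tstarts v (b :: t) p = tstarts v t (p + 1) by
        simp [tstarts, hb]]
    · rw [show rl v run (b :: t) = run :: rl b 1 t from if_neg hb]
      simp only [List.foldl_cons]
      have h := ih b 1 (p + 1) (acc ++ [p - run]) (by omega)
      rw [show p + 1 - 1 = p by ring] at h
      rw [show p - run + run = p by ring, h]
      rw [show tstarts v (b :: t) p = p :: tstarts b t (p + 1) from if_pos hb]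
      simp

theorem B_eq_rstarts (xs : List Int) : input_group_py_alt xs = rstarts xs 0 := by
  cases xs with
  | nil => rfl
  | cons a t =>
    unfold input_group_py_alt
    rw [bStage1_eq_rl]
    have h := bStage2_fold t a 1 1 [] (by omega)
    norm_num at h
    rw [h]
    rfl

-- ===== VERDICT (by name: the statement is the Claim_ definition above) =====
theorem input_group_py_spec : Claim_equal_input_group_py := by
  intro xs _ hpre
  unfold Spec_input_group_py
  rw [A_eq_rstarts xs hpre, B_eq_rstarts xs]
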